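-- pv_equiv track=rewrite | github.com/robert1948/autorisen | scripts/devlog_update.py | insert_quick_entry
-- ===== SOURCE A (Python) =====
-- def insert_quick_entry(lines: list[str], entry: str) -> list[str]:
--     # Insert after first heading line (# Autorisen – Development Log)
--     out: list[str] = []
--     inserted = False
--     for i, line in enumerate(lines):
--         out.append(line)
--         if not inserted and line.startswith("# Autorisen"):
--             # Skip possible blank line(s) then insert
--             # Ensure a blank line follows heading then our entry
--             # Find next non-empty line index for correct placement
--             inserted = True
--             out.append("")
--             out.append(entry)
--             out.append("")
--     if not inserted:  # fallback append
--         out.insert(0, entry)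
--     return out
-- ===== SOURCE B (Python) =====
-- def insert_quick_entry(lines: list[str], entry: str) -> list[str]:
--     # Locate the first heading line, then splice the entry in by slicing.
--     idx = next((i for i, line in enumerate(lines) if line.startswith("# Autorisen")), None)
--     if idx is None:
--         return [entry] + lines
--     return lines[:idx + 1] + ["", entry, ""] + lines[idx + 1:]
-- ===== Notes on version B (the rewrite author's own statement) =====
-- stated objective: simpler
-- what changed: Replaced the append-as-you-scan loop with an inserted flag by a locate-then-splice construction: find the first heading index, then build the result by slice concatenation.
import Mathlib
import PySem

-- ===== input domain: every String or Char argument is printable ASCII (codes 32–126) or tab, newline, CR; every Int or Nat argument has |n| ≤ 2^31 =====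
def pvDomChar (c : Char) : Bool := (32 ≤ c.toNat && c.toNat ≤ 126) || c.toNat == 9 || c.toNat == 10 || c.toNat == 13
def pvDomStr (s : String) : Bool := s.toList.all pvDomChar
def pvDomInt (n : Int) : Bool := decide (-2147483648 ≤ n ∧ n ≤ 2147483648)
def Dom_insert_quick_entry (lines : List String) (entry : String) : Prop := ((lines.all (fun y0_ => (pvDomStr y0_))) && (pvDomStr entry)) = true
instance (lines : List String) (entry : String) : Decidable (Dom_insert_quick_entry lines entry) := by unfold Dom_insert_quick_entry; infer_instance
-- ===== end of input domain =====

-- B replaces A's append-as-you-scan loop with a locate-then-splice construction (simpler decomposition, same O(n) cost).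


-- ===== PORT A =====
-- one loop iteration of A: append the line; on the first heading also append "", entry, ""
def pvStepA (entry : String) (st : List String × Bool) (line : String) : List String × Bool :=
  if !st.2 && PySem.Str.startswith line "# Autorisen" then
    (st.1 ++ [line] ++ ["", entry, ""], true)
  else
    (st.1 ++ [line], st.2)

def insert_quick_entry (lines : List String) (entry : String) : List String :=
  let st := lines.foldl (pvStepA entry) ([], false)
  if !st.2 then entry :: st.1 else st.1

-- ===== PORT B =====
def insert_quick_entry_alt (lines : List String) (entry : String) : List String :=
  match lines.findIdx? (fun line => PySem.Str.startswith line "# Autorisen") with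
  | none => entry :: lines
  | some i => lines.take (i + 1) ++ ["", entry, ""] ++ lines.drop (i + 1)

-- ===== PRECONDITION & SPEC =====
def Spec_insert_quick_entry (lines : List String) (entry : String) (out : List String) : Prop := out = insert_quick_entry_alt lines entry
instance (lines : List String) (entry : String) (out : List String) : Decidable (Spec_insert_quick_entry lines entry out) := by unfold Spec_insert_quick_entry; infer_instance

-- ===== CLAIM (what is proved, stated in full; the proofs are below) =====
def Claim_equal_insert_quick_entry : Prop := ∀ (lines : List String) (entry : String), Dom_insert_quick_entry lines entry → Spec_insert_quick_entry lines entry (insert_quick_entry lines entry)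

-- ===== LEMMAS AND PROOFS =====

-- once the entry is inserted, the rest of A's loop just appends the remaining lines
lemma foldl_stepA_true (entry : String) :
    ∀ (ls acc : List String), ls.foldl (pvStepA entry) (acc, true) = (acc ++ ls, true) := by
  intro ls
  induction ls with
  | nil => simp
  | cons h t ih => intro acc; simp [pvStepA, ih]

-- characterisation of A's loop from a not-yet-inserted state, in terms of B's heading search
lemma foldl_stepA_false (entry : String) :
    ∀ (ls acc : List String),
      ls.foldl (pvStepA entry) (acc, false) =
        match ls.findIdx? (fun line => PySem.Str.startswith line "# Autorisen") with
        | none => (acc ++ ls, false)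
        | some i => (acc ++ ls.take (i + 1) ++ ["", entry, ""] ++ ls.drop (i + 1), true) := by
  intro ls
  induction ls with
  | nil => simp
  | cons h t ih =>
    intro acc
    simp only [List.foldl_cons, List.findIdx?_cons, pvStepA, Bool.not_false, Bool.true_and]
    by_cases hp : PySem.Str.startswith h "# Autorisen" = true
    · rw [if_pos hp, if_pos hp, foldl_stepA_true]
      simp
    · rw [if_neg hp, if_neg hp, ih]
      cases hfi : t.findIdx? (fun line => PySem.Str.startswith line "# Autorisen") with
      | none => simp
      | some i => simp [List.take_succ_cons, List.drop_succ_cons]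

-- ===== VERDICT (by name: the statement is the Claim_ definition above) =====
theorem insert_quick_entry_spec : Claim_equal_insert_quick_entry := by
  intro lines entry _
  unfold Spec_insert_quick_entry insert_quick_entry insert_quick_entry_alt
  rw [foldl_stepA_false entry lines []]
  cases hfi : lines.findIdx? (fun line => PySem.Str.startswith line "# Autorisen") with
  | none => simp
  | some i => simp
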